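-- pv_equiv track=rewrite | github.com/OvertliDS/overtli-studio-suite | pollinations/compat_retry.py | _ordered_optional_keys
-- ===== SOURCE A (Python) =====
-- from typing import Any, Callable, Iterable
--
-- COMPATIBILITY_DROP_ORDER = (
--     "seed",
--     "style",
--     "instrumental",
--     "voice",
--     "response_format",
-- )
--
-- def _ordered_optional_keys(
--     params: dict[str, Any],
--     payload: dict[str, Any],
--     optional_param_keys: set[str],
--     optional_payload_keys: set[str],
-- ) -> list[str]:
--     available = {
--         key
--         for key in optional_param_keys
--         if key in params
--     } | {
--         key
--         for key in optional_payload_keys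
--         if key in payload
--     }
--
--     ordered = [key for key in COMPATIBILITY_DROP_ORDER if key in available]
--     ordered.extend(sorted(key for key in available if key not in set(COMPATIBILITY_DROP_ORDER)))
--     return ordered
-- ===== SOURCE B (Python) =====
-- COMPATIBILITY_DROP_ORDER = (
--     "seed",
--     "style",
--     "instrumental",
--     "voice",
--     "response_format",
-- )
--
-- def _ordered_optional_keys(params, payload, optional_param_keys, optional_payload_keys):
--     rank = {key: index for index, key in enumerate(COMPATIBILITY_DROP_ORDER)}
--     fallback = len(COMPATIBILITY_DROP_ORDER)
--     available = {
--         key for key in optional_param_keys if key in params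
--     } | {
--         key for key in optional_payload_keys if key in payload
--     }
--     return sorted(available, key=lambda key: (rank.get(key, fallback), key))
-- ===== Notes on version B (the rewrite author's own statement) =====
-- stated objective: idiomatic
-- what changed: Replaces A's two-phase construction (scan the priority tuple, then append the sorted remainder) by a single sort of the available keys under a composite key (rank-in-priority-tuple with a maximal fallback rank, then the name).
import Mathlib
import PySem

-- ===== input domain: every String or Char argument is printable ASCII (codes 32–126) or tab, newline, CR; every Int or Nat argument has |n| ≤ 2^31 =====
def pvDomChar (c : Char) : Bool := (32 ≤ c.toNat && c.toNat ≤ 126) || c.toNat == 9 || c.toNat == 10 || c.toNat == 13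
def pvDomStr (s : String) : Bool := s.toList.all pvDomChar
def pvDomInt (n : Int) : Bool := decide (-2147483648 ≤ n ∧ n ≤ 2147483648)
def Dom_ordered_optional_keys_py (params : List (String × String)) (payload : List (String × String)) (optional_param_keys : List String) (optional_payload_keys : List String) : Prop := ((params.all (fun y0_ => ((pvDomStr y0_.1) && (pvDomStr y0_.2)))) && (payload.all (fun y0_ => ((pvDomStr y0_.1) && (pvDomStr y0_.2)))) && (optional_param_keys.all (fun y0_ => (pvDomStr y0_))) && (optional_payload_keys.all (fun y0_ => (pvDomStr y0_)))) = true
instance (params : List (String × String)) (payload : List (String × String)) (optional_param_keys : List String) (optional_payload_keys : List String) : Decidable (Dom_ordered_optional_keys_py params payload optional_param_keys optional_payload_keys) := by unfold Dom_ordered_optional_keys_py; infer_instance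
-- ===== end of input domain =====

-- B replaces A's two-phase "filter the priority tuple, then append the sorted remainder"
-- by ONE sort of the available keys under the composite key (priority rank with maximal
-- fallback, then name) — same task, the idiomatic single-sort decomposition.

-- ===== PORT A =====
-- COMPATIBILITY_DROP_ORDER (module constant, shared by both Pythons)
def pvDropOrder : List String := ["seed", "style", "instrumental", "voice", "response_format"]

-- `available = {k for k in opk if k in params} | {k for k in oplk if k in payload}`
-- (identical line in Source A and Source B, hence a shared helper)
def pvAvailable (params : List (String × String)) (payload : List (String × String)) (optional_param_keys : List String) (optional_payload_keys : List String) : PySem.Set String :=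
  PySem.Set.union
    (PySem.Set.ofList (optional_param_keys.filter (fun k => (PySem.Dict.mk params).contains k)))
    (PySem.Set.ofList (optional_payload_keys.filter (fun k => (PySem.Dict.mk payload).contains k)))

def ordered_optional_keys_py (params : List (String × String)) (payload : List (String × String)) (optional_param_keys : List String) (optional_payload_keys : List String) : List String :=
  let available := pvAvailable params payload optional_param_keys optional_payload_keys
  let ordered := pvDropOrder.filter (fun k => PySem.Set.contains available k)
  ordered ++ PySem.List.sorted
    (available.filter (fun k => !(PySem.Set.contains (PySem.Set.ofList pvDropOrder) k)))
    (fun x => x) false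

-- ===== PORT B =====
-- `rank = {key: index for index, key in enumerate(COMPATIBILITY_DROP_ORDER)}`
def pvRank : PySem.Dict String Int :=
  (PySem.List.enumerate pvDropOrder).foldl (fun d p => d.insert p.2 p.1) PySem.Dict.empty

def ordered_optional_keys_py_alt (params : List (String × String)) (payload : List (String × String)) (optional_param_keys : List String) (optional_payload_keys : List String) : List String :=
  let fallback : Int := (pvDropOrder.length : Int)
  let available := pvAvailable params payload optional_param_keys optional_payload_keys
  PySem.List.sorted2 available (fun k => pvRank.getD k fallback) (fun k => k) false

-- ===== PRECONDITION & SPEC =====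
def Spec_ordered_optional_keys_py (params : List (String × String)) (payload : List (String × String)) (optional_param_keys : List String) (optional_payload_keys : List String) (out : List String) : Prop := out = ordered_optional_keys_py_alt params payload optional_param_keys optional_payload_keys
instance (params : List (String × String)) (payload : List (String × String)) (optional_param_keys : List String) (optional_payload_keys : List String) (out : List String) : Decidable (Spec_ordered_optional_keys_py params payload optional_param_keys optional_payload_keys out) := by unfold Spec_ordered_optional_keys_py; infer_instance

-- ===== CLAIM (what is proved, stated in full; the proofs are below) =====
def Claim_equal_ordered_optional_keys_py : Prop := ∀ (params : List (String × String)) (payload : List (String × String)) (optional_param_keys : List String) (optional_payload_keys : List String), Dom_ordered_optional_keys_py params payload optional_param_keys optional_payload_keys → Spec_ordered_optional_keys_py params payload optional_param_keys optional_payload_keys (ordered_optional_keys_py params payload optional_param_keys optional_payload_keys)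

-- ===== LEMMAS AND PROOFS =====

-- sorted2 with key pair (k1, id) is sorted with the lexicographic key
lemma sorted2_eq_sorted_lex (xs : List String) (k1 : String → Int) :
    PySem.List.sorted2 xs k1 (fun k => k) false
      = PySem.List.sorted xs (fun k => toLex (k1 k, k)) false := by
  have hbf : (fun a b => decide (k1 a < k1 b) || (!decide (k1 b < k1 a) && decide (a < b)))
      = (fun a b : String => decide (toLex (k1 a, a) < toLex (k1 b, b))) := by
    funext a b
    rcases lt_trichotomy (k1 a) (k1 b) with h | h | h
    · simp [Prod.Lex.lt_iff, h]
    · simp [Prod.Lex.lt_iff, h]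
    · simp [Prod.Lex.lt_iff, h, asymm h, h.ne']
  simp only [PySem.List.sorted2, PySem.List.sorted, if_neg (by decide : ¬ (false = true))]
  rw [hbf]

lemma key_lt_of_ranks (a b : String) (ra rb : Int) (h : ra < rb ∨ (ra = rb ∧ a < b)) :
    toLex (ra, a) < toLex (rb, b) := by
  rcases h with h | ⟨h1, h2⟩
  · exact Prod.Lex.lt_iff.mpr (Or.inl h)
  · exact Prod.Lex.lt_iff.mpr (Or.inr ⟨h1, h2⟩)

lemma rank_getD_of_not_mem (k : String) (hk : k ∉ pvDropOrder) :
    pvRank.getD k 5 = 5 := by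
  simp only [pvDropOrder, List.mem_cons, List.not_mem_nil, or_false] at hk
  push Not at hk
  obtain ⟨h1, h2, h3, h4, h5⟩ := hk
  have e1 : (("seed" : String) == k) = false := beq_eq_false_iff_ne.mpr (Ne.symm h1)
  have e2 : (("style" : String) == k) = false := beq_eq_false_iff_ne.mpr (Ne.symm h2)
  have e3 : (("instrumental" : String) == k) = false := beq_eq_false_iff_ne.mpr (Ne.symm h3)
  have e4 : (("voice" : String) == k) = false := beq_eq_false_iff_ne.mpr (Ne.symm h4)
  have e5 : (("response_format" : String) == k) = false := beq_eq_false_iff_ne.mpr (Ne.symm h5)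
  simp [pvRank, pvDropOrder, PySem.List.enumerate, PySem.Dict.getD, PySem.Dict.get?,
    PySem.Dict.insert, PySem.Dict.empty, List.find?, e1, e2, e3, e4, e5]

-- the heart: for any duplicate-free `available` list, A's two-phase list IS
-- the single sort under the composite key
lemma two_phase_eq_single_sort (l : List String) (hl : l.Nodup) :
    pvDropOrder.filter (fun k => PySem.Set.contains l k)
      ++ PySem.List.sorted
          (l.filter (fun k => !(PySem.Set.contains (PySem.Set.ofList pvDropOrder) k)))
          (fun x => x) false
    = PySem.List.sorted2 l (fun k => pvRank.getD k ((pvDropOrder.length : Int))) (fun k => k) false := by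
  have hlen : ((pvDropOrder.length : Int)) = 5 := by decide
  rw [hlen, sorted2_eq_sorted_lex]
  -- normalise the membership tests to plain list membership
  have hofl : PySem.Set.ofList pvDropOrder = pvDropOrder :=
    PySem.Set.ofList_eq_self_of_nodup pvDropOrder (by decide)
  have hcont1 : (fun k => PySem.Set.contains l k) = (fun k => decide (k ∈ l)) := by
    funext k; exact PySem.Set.contains_eq_decide l k
  have hcont2 : (fun k => !(PySem.Set.contains (PySem.Set.ofList pvDropOrder) k))
      = (fun k => !decide (k ∈ pvDropOrder)) := by
    funext k; rw [hofl, PySem.Set.contains_eq_decide]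
  rw [hcont1, hcont2]
  refine (PySem.List.sorted_eq_of_perm_of_pairwise_lt _ _ _ ?_ ?_).symm
  · -- permutation with l
    have h1 : (pvDropOrder.filter (fun k => decide (k ∈ l))).Perm
        (l.filter (fun k => decide (k ∈ pvDropOrder))) := by
      rw [List.perm_ext_iff_of_nodup (List.Nodup.filter _ (by decide)) (List.Nodup.filter _ hl)]
      intro a; simp [List.mem_filter, and_comm]
    have h2 : (PySem.List.sorted (l.filter (fun k => !decide (k ∈ pvDropOrder))) (fun x => x) false).Perm
        (l.filter (fun k => !decide (k ∈ pvDropOrder))) := PySem.List.sorted_perm _ _ _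
    exact (h1.append h2).trans (List.filter_append_perm _ l)
  · -- pairwise strictly increasing under the composite key
    rw [List.pairwise_append]
    refine ⟨?_, ?_, ?_⟩
    · -- priority part: a sublist of pvDropOrder, which is key-increasing
      refine List.Pairwise.sublist List.filter_sublist ?_
      decide
    · -- remainder part: sorted by name, all ranks are the fallback 5
      have hsp := PySem.List.sorted_pairwise (l.filter (fun k => !decide (k ∈ pvDropOrder))) (fun x => x)
      have hsn : (PySem.List.sorted (l.filter (fun k => !decide (k ∈ pvDropOrder))) (fun x => x) false).Nodup :=
        (PySem.List.sorted_perm _ _ _).nodup_iff.mpr (List.Nodup.filter _ hl)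
      refine (hsp.and hsn).imp_of_mem ?_
      intro a b ha hb hab
      have ha' : a ∉ pvDropOrder := by
        have := (List.mem_filter.mp ((PySem.List.sorted_perm _ _ _).mem_iff.mp ha)).2
        simpa using this
      have hb' : b ∉ pvDropOrder := by
        have := (List.mem_filter.mp ((PySem.List.sorted_perm _ _ _).mem_iff.mp hb)).2
        simpa using this
      rw [rank_getD_of_not_mem a ha', rank_getD_of_not_mem b hb']
      exact key_lt_of_ranks a b 5 5 (Or.inr ⟨rfl, lt_of_le_of_ne hab.1 hab.2⟩)
    · -- cross: every priority key ranks strictly below the fallback 5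
      intro a ha b hb
      have ha' : a ∈ pvDropOrder := (List.mem_filter.mp ha).1
      have hb' : b ∉ pvDropOrder := by
        have := (List.mem_filter.mp ((PySem.List.sorted_perm _ _ _).mem_iff.mp hb)).2
        simpa using this
      rw [rank_getD_of_not_mem b hb']
      have hra : pvRank.getD a 5 < 5 := by
        fin_cases ha' <;> decide
      exact key_lt_of_ranks a b _ 5 (Or.inl hra)

lemma available_nodup (params payload : List (String × String)) (opk oplk : List String) :
    (pvAvailable params payload opk oplk).Nodup := by
  unfold pvAvailable
  exact PySem.Set.nodup_union _ _ (PySem.Set.nodup_ofList _)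

-- ===== VERDICT (by name: the statement is the Claim_ definition above) =====
theorem ordered_optional_keys_py_spec : Claim_equal_ordered_optional_keys_py := by
  intro params payload opk oplk _
  unfold Spec_ordered_optional_keys_py ordered_optional_keys_py ordered_optional_keys_py_alt
  exact two_phase_eq_single_sort _ (available_nodup params payload opk oplk)
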